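-- pv_equiv track=rewrite | github.com/superiorshrimp/adventofcode | 2021/4/main.py | sum_missing
-- ===== SOURCE A (Python) =====
-- def sum_missing(seq, arr):
--     suma = 0
--     for row in arr:
--         suma += sum(row)
--     for el in seq:
--         for row in arr:
--             if el in row:
--                 suma -= el
--     return suma
-- ===== SOURCE B (Python) =====
-- def sum_missing(seq, arr):
--     cnt = {}
--     for row in arr:
--         for v in set(row):
--             cnt[v] = cnt.get(v, 0) + 1
--     total = 0
--     for row in arr:
--         total += sum(row)
--     sub = 0
--     for el in seq:
--         sub += el * cnt.get(el, 0)
--     return total - sub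
-- ===== Notes on version B (the rewrite author's own statement) =====
-- stated objective: faster
-- what changed: Instead of scanning every row for every seq element, B builds a dictionary value -> number of rows containing it in one pass over arr, then does one pass over seq subtracting el times its row count.
import Mathlib
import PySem

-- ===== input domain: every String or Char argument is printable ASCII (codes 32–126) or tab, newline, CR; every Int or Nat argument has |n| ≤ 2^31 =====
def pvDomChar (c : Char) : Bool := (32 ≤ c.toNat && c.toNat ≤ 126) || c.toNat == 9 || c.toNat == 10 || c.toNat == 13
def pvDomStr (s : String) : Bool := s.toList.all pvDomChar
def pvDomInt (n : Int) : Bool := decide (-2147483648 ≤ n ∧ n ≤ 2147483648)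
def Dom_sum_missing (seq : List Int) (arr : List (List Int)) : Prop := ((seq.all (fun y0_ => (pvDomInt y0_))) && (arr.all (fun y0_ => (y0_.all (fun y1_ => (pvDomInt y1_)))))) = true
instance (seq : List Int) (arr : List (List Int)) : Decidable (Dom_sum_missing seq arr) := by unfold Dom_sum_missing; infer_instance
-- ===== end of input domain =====

-- B replaces A's rescans of arr for every seq element by a dictionary value → number of
-- rows containing it, built once, then a single pass over seq (asymptotically faster).

-- ===== PORT A =====
def sum_missing (seq : List Int) (arr : List (List Int)) : Int :=
  let suma := arr.foldl (fun s row => s + row.sum) 0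
  seq.foldl (fun s el => arr.foldl (fun s2 row => if el ∈ row then s2 - el else s2) s) suma

-- ===== PORT B =====
def sum_missing_alt (seq : List Int) (arr : List (List Int)) : Int :=
  let cnt : PySem.Dict Int Int :=
    arr.foldl (fun d row =>
      (PySem.Set.ofList row).foldl (fun d v => d.insert v (d.getD v 0 + 1)) d) PySem.Dict.empty
  let total := arr.foldl (fun s row => s + row.sum) 0
  let sub := seq.foldl (fun s el => s + el * cnt.getD el 0) 0
  total - sub

-- ===== PRECONDITION & SPEC =====
def Spec_sum_missing (seq : List Int) (arr : List (List Int)) (out : Int) : Prop := out = sum_missing_alt seq arr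
instance (seq : List Int) (arr : List (List Int)) (out : Int) : Decidable (Spec_sum_missing seq arr out) := by unfold Spec_sum_missing; infer_instance

-- ===== CLAIM (what is proved, stated in full; the proofs are below) =====
def Claim_equal_sum_missing : Prop := ∀ (seq : List Int) (arr : List (List Int)), Dom_sum_missing seq arr → Spec_sum_missing seq arr (sum_missing seq arr)

-- ===== LEMMAS AND PROOFS =====

-- rows of arr that contain el, as an Int
def rowCount (arr : List (List Int)) (el : Int) : Int :=
  (arr.countP (fun row => decide (el ∈ row)) : Nat)

-- A's inner loop over arr subtracts el once per row containing el
theorem a_inner (arr : List (List Int)) (el : Int) (s : Int) :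
    arr.foldl (fun s2 row => if el ∈ row then s2 - el else s2) s = s - el * rowCount arr el := by
  induction arr generalizing s with
  | nil => simp [rowCount]
  | cons r t ih =>
      simp only [List.foldl_cons, ih, rowCount, List.countP_cons]
      by_cases h : el ∈ r <;> simp [h] <;> push_cast [Int.mul_add] <;> ring

-- a "+ f el" accumulator loop is s plus a sum
theorem foldl_add_sum (f : Int → Int) (seq : List Int) (s : Int) :
    seq.foldl (fun s el => s + f el) s = s + (seq.map f).sum := by
  induction seq generalizing s with
  | nil => simp
  | cons e t ih => simp [ih]; ring

-- A's outer loop subtracts the same sum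
theorem a_outer (C : Int → Int) (seq : List Int) (s : Int) :
    seq.foldl (fun s el => s - el * C el) s = s - (seq.map (fun el => el * C el)).sum := by
  induction seq generalizing s with
  | nil => simp
  | cons e t ih => simp [ih]; ring

-- the distinct elements of a row each count once
theorem count_ofList (row : List Int) (el : Int) :
    (PySem.Set.ofList row).count el = (if el ∈ row then 1 else 0) := by
  by_cases h : el ∈ row
  · rw [if_pos h]
    exact List.count_eq_one_of_mem (PySem.Set.nodup_ofList row) ((PySem.Set.mem_ofList row el).mpr h)
  · simp [h, List.count_eq_zero_of_not_mem (fun hc => h ((PySem.Set.mem_ofList row el).mp hc))]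

-- B's dictionary holds the row counts
theorem dict_counts (arr : List (List Int)) (d : PySem.Dict Int Int) (el : Int) :
    (arr.foldl (fun d row =>
        (PySem.Set.ofList row).foldl (fun d v => d.insert v (d.getD v 0 + 1)) d) d).getD el 0
      = d.getD el 0 + rowCount arr el := by
  induction arr generalizing d with
  | nil => simp [rowCount]
  | cons r t ih =>
      simp only [List.foldl_cons, ih, PySem.Dict.getD_foldl_insert_add_one, count_ofList,
        rowCount, List.countP_cons]
      by_cases h : el ∈ r <;> simp [h] <;> push_cast [Int.mul_add] <;> ring

-- ===== VERDICT (by name: the statement is the Claim_ definition above) =====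
theorem sum_missing_spec : Claim_equal_sum_missing := by
  intro seq arr _
  unfold Spec_sum_missing sum_missing sum_missing_alt
  simp only []
  have h1 : seq.foldl (fun s el => arr.foldl (fun s2 row => if el ∈ row then s2 - el else s2) s)
      (arr.foldl (fun s row => s + row.sum) 0)
      = seq.foldl (fun s el => s - el * rowCount arr el) (arr.foldl (fun s row => s + row.sum) 0) :=
    PySem.List.foldl_congr_mem seq _ _ _ (fun s el _ => a_inner arr el s)
  rw [h1, a_outer (rowCount arr) seq, foldl_add_sum]
  have hC : ∀ el ∈ seq, el * (arr.foldl (fun d row =>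
      (PySem.Set.ofList row).foldl (fun d v => d.insert v (d.getD v 0 + 1)) d)
      PySem.Dict.empty).getD el 0 = el * rowCount arr el := by
    intro el _; rw [dict_counts]; simp [PySem.Dict.getD_empty]
  rw [List.map_congr_left hC]
  ring
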